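-- pv_equiv track=rewrite | github.com/keitaroyam/cctbx_fork | iotbx/pdb/atom_selection.py | _character_case_id
-- ===== SOURCE A (Python) =====
-- def _character_case_id(strings):
--   have_upper = False
--   have_lower = False
--   for s in strings:
--     for c in s:
--       if   (c in "ABCDEFGHIJKLMNOPQRSTUVWXYZ"):
--         if (have_lower): return 0
--         have_upper = True
--       elif (c in "abcdefghijklmnopqrstuvwxyz"):
--         if (have_upper): return 0
--         have_lower = True
--   if (have_upper): return 1
--   if (have_lower): return -1
--   return 0
-- ===== SOURCE B (Python) =====
-- UPPER = set("ABCDEFGHIJKLMNOPQRSTUVWXYZ")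
-- LOWER = set("abcdefghijklmnopqrstuvwxyz")
--
-- def _character_case_id(strings):
--   chars = set()
--   for s in strings:
--     chars.update(s)
--   has_upper = bool(chars & UPPER)
--   has_lower = bool(chars & LOWER)
--   if has_upper and has_lower: return 0
--   if has_upper: return 1
--   if has_lower: return -1
--   return 0
-- ===== Notes on version B (the rewrite author's own statement) =====
-- stated objective: simpler
-- what changed: Replaces the interleaved stateful early-exit scan over every character with building one set of all seen characters, two set-intersection presence tests against fixed ASCII letter sets, and a final four-way combine.
import Mathlib
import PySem

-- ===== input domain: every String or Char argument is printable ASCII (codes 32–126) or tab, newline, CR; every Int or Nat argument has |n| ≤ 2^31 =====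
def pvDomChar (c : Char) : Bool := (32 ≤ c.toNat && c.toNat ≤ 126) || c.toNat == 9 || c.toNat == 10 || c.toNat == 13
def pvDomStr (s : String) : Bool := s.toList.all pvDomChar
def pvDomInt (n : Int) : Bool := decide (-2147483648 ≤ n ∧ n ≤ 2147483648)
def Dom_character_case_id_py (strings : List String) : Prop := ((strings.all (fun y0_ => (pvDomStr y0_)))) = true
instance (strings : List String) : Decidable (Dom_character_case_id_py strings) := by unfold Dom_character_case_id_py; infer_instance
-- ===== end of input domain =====

-- B builds one set of all seen characters and tests it against the fixed ASCII letter
-- sets, instead of A's interleaved stateful early-exit scan (objective: simpler).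

-- ===== PORT A =====
-- the two string literals A tests membership in ('c in "AB…Z"': for a single
-- character this is exactly list membership of that character)
def pvUpperChars : List Char := "ABCDEFGHIJKLMNOPQRSTUVWXYZ".toList
def pvLowerChars : List Char := "abcdefghijklmnopqrstuvwxyz".toList

-- the inner 'for c in s' loop; none = the early 'return 0', some = updated flags
def pvInnerA : List Char → Bool → Bool → Option (Bool × Bool)
  | [], hu, hl => some (hu, hl)
  | c :: cs, hu, hl =>
    if pvUpperChars.contains c then
      if hl then none else pvInnerA cs true hl
    else if pvLowerChars.contains c then
      if hu then none else pvInnerA cs hu true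
    else pvInnerA cs hu hl

-- the outer 'for s in strings' loop plus the trailing return chain
def pvOuterA : List String → Bool → Bool → Int
  | [], hu, hl => if hu then 1 else if hl then -1 else 0
  | s :: ss, hu, hl =>
    match pvInnerA s.toList hu hl with
    | none => 0
    | some (hu', hl') => pvOuterA ss hu' hl'

def character_case_id_py (strings : List String) : Int := pvOuterA strings false false

-- ===== PORT B =====
def character_case_id_py_alt (strings : List String) : Int :=
  let chars : PySem.Set Char :=
    strings.foldl (fun acc s => PySem.Set.update acc s.toList) PySem.Set.empty
  let hasUpper : Bool := !(PySem.Set.inter chars (PySem.Set.ofList pvUpperChars)).isEmpty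
  let hasLower : Bool := !(PySem.Set.inter chars (PySem.Set.ofList pvLowerChars)).isEmpty
  if hasUpper && hasLower then 0
  else if hasUpper then 1
  else if hasLower then -1
  else 0

-- ===== PRECONDITION & SPEC =====
def Spec_character_case_id_py (strings : List String) (out : Int) : Prop := out = character_case_id_py_alt strings
instance (strings : List String) (out : Int) : Decidable (Spec_character_case_id_py strings out) := by unfold Spec_character_case_id_py; infer_instance

-- ===== CLAIM (what is proved, stated in full; the proofs are below) =====
def Claim_equal_character_case_id_py : Prop := ∀ (strings : List String), Dom_character_case_id_py strings → Spec_character_case_id_py strings (character_case_id_py strings)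

-- ===== LEMMAS AND PROOFS =====

-- "some string contains an upper/lower-case letter"
def pvHasUp (ss : List String) : Bool := ss.any (fun s => s.toList.any (pvUpperChars.contains ·))
def pvHasLo (ss : List String) : Bool := ss.any (fun s => s.toList.any (pvLowerChars.contains ·))

-- the common combine both programs compute
def pvCombine (u l : Bool) : Int := if u && l then 0 else if u then 1 else if l then -1 else 0

-- the upper- and lower-case letter lists are disjoint
theorem pv_upper_not_lower (c : Char) (hc : pvUpperChars.contains c = true) :
    c ∉ pvLowerChars := by
  have h : pvUpperChars.all (fun c => !pvLowerChars.contains c) = true := by decide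
  have := List.all_eq_true.mp h c (by simpa using hc)
  simpa using this

theorem pv_lower_not_upper (c : Char) (hc : pvLowerChars.contains c = true) :
    c ∉ pvUpperChars := by
  have h : pvLowerChars.all (fun c => !pvUpperChars.contains c) = true := by decide
  have := List.all_eq_true.mp h c (by simpa using hc)
  simpa using this

theorem pvInnerA_eq (cs : List Char) : ∀ (hu hl : Bool), (hu && hl) = false →
    pvInnerA cs hu hl =
      (if (hu || cs.any (pvUpperChars.contains ·)) && (hl || cs.any (pvLowerChars.contains ·))
       then none
       else some (hu || cs.any (pvUpperChars.contains ·), hl || cs.any (pvLowerChars.contains ·))) := by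
  induction cs with
  | nil => intro hu hl h; cases hu <;> cases hl <;> simp_all [pvInnerA]
  | cons c cs ih =>
    intro hu hl h
    by_cases hc : pvUpperChars.contains c
    · have hcl : c ∉ pvLowerChars := pv_upper_not_lower c hc
      cases hl with
      | true => cases hu <;> simp_all [pvInnerA]
      | false =>
        have := ih true false (by simp)
        cases hu <;> simp_all [pvInnerA]
    · by_cases hc2 : pvLowerChars.contains c
      · have hcu : c ∉ pvUpperChars := pv_lower_not_upper c hc2
        cases hu with
        | true => cases hl <;> simp_all [pvInnerA]
        | false =>
          have := ih false true (by simp)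
          cases hl <;> simp_all [pvInnerA]
      · have := ih hu hl h
        simp_all [pvInnerA]

theorem pvOuterA_eq (ss : List String) : ∀ (hu hl : Bool), (hu && hl) = false →
    pvOuterA ss hu hl = pvCombine (hu || pvHasUp ss) (hl || pvHasLo ss) := by
  induction ss with
  | nil => intro hu hl h; cases hu <;> cases hl <;> simp_all [pvOuterA, pvHasUp, pvHasLo, pvCombine]
  | cons s ss ih =>
    intro hu hl h
    rw [pvOuterA, pvInnerA_eq s.toList hu hl h]
    by_cases hcond : ((hu || s.toList.any (pvUpperChars.contains ·))
        && (hl || s.toList.any (pvLowerChars.contains ·))) = true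
    · rw [if_pos hcond]
      simp only [pvHasUp, pvHasLo, List.any_cons, pvCombine] at *
      cases hu <;> cases hl <;> simp_all
    · rw [if_neg (by simpa using hcond)]
      rw [show (match some ((hu || s.toList.any (pvUpperChars.contains ·)),
            (hl || s.toList.any (pvLowerChars.contains ·))) with
          | none => (0 : Int)
          | some (hu', hl') => pvOuterA ss hu' hl') =
          pvOuterA ss (hu || s.toList.any (pvUpperChars.contains ·))
            (hl || s.toList.any (pvLowerChars.contains ·)) from rfl]
      rw [ih _ _ (by simpa using hcond)]
      simp [pvHasUp, pvHasLo, pvCombine, Bool.or_assoc]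

theorem pv_mem_update {s : PySem.Set Char} {xs : List Char} {y : Char} :
    y ∈ PySem.Set.update s xs ↔ y ∈ s ∨ y ∈ xs := by
  induction xs generalizing s with
  | nil => simp [PySem.Set.update]
  | cons x xs ih =>
    simp only [PySem.Set.update, List.foldl_cons]
    rw [show List.foldl PySem.Set.add (s.add x) xs = PySem.Set.update (s.add x) xs from rfl]
    rw [ih, PySem.Set.mem_add]
    simp [or_assoc, or_comm]
    tauto

theorem pv_mem_chars (ss : List String) (y : Char) :
    y ∈ ss.foldl (fun acc s => PySem.Set.update acc s.toList) PySem.Set.empty ↔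
      ∃ s ∈ ss, y ∈ s.toList := by
  have key : ∀ (l : List String) (init : PySem.Set Char),
      y ∈ l.foldl (fun acc s => PySem.Set.update acc s.toList) init ↔
        y ∈ init ∨ ∃ s ∈ l, y ∈ s.toList := by
    intro l
    induction l with
    | nil => simp
    | cons s l ih =>
      intro init
      simp only [List.foldl_cons]
      rw [ih, pv_mem_update]
      simp [or_assoc]
  rw [key]
  simp [PySem.Set.empty]

theorem pv_inter_test (ss : List String) (letters : List Char) :
    (!(PySem.Set.inter
        (ss.foldl (fun acc s => PySem.Set.update acc s.toList) PySem.Set.empty)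
        (PySem.Set.ofList letters)).isEmpty)
      = ss.any (fun s => s.toList.any (letters.contains ·)) := by
  rw [Bool.eq_iff_iff]
  simp only [Bool.not_eq_true', List.isEmpty_eq_false_iff_exists_mem, PySem.Set.inter,
    List.mem_filter, List.any_eq_true]
  constructor
  · rintro ⟨c, hc, hmem⟩
    rcases (pv_mem_chars ss c).1 hc with ⟨s, hs, hcs⟩
    exact ⟨s, hs, c, hcs, by simpa [PySem.Set.mem_ofList] using hmem⟩
  · rintro ⟨s, hs, c, hcs, hc⟩
    refine ⟨c, (pv_mem_chars ss c).2 ⟨s, hs, hcs⟩, ?_⟩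
    simp only [PySem.Set.contains]
    simp [PySem.Set.mem_ofList]
    simpa using hc

theorem pv_alt_eq (ss : List String) :
    character_case_id_py_alt ss = pvCombine (pvHasUp ss) (pvHasLo ss) := by
  unfold character_case_id_py_alt
  simp only [pv_inter_test]
  rfl

-- ===== VERDICT (by name: the statement is the Claim_ definition above) =====
theorem character_case_id_py_spec : Claim_equal_character_case_id_py := by
  intro strings _
  unfold Spec_character_case_id_py character_case_id_py
  rw [pvOuterA_eq strings false false rfl, pv_alt_eq]
  simp
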